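-- pv_equiv track=rewrite | github.com/novaeco-tech/novaeco-devtools | nova-cli/src/nova_cli/commands/workspace.py | categorize_repos
-- ===== SOURCE A (Python) =====
-- TOPIC_PRIORITY = [
--     "meta",
--     "ecosystem",
--     "enabler",
--     "sector",
--     "worker",
--     "product"
-- ]
--
-- def categorize_repos(repo_list):
--     """Sorts repositories into buckets based on TOPIC_PRIORITY."""
--     categorized = {topic: [] for topic in TOPIC_PRIORITY}
--     categorized["uncategorized"] = []
--
--     for repo in repo_list:
--         repo_topics = repo.get("topics", [])
--         assigned = False
--
--         # Check topics in priority order (e.g. if it has 'ecosystem' and 'meta', 'meta' wins)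
--         for topic in TOPIC_PRIORITY:
--             if topic in repo_topics:
--                 categorized[topic].append(repo)
--                 assigned = True
--                 break
--
--         if not assigned:
--             categorized["uncategorized"].append(repo)
--
--     return categorized
-- ===== SOURCE B (Python) =====
-- TOPIC_PRIORITY = [
--     "meta",
--     "ecosystem",
--     "enabler",
--     "sector",
--     "worker",
--     "product"
-- ]
--
--
-- def categorize_repos(repo_list):
--     """Sorts repositories into buckets based on TOPIC_PRIORITY."""
--     idx = {topic: i for i, topic in enumerate(TOPIC_PRIORITY)}
--     n = len(TOPIC_PRIORITY)
--     buckets = [[] for _ in range(n + 1)]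
--     for repo in repo_list:
--         matches = [idx[t] for t in repo.get("topics", []) if t in idx]
--         best = min(matches, default=n)
--         buckets[best].append(repo)
--     out = dict(zip(TOPIC_PRIORITY, buckets))
--     out["uncategorized"] = buckets[n]
--     return out
-- ===== Notes on version B (the rewrite author's own statement) =====
-- stated objective: alternative
-- what changed: B replaces A's priority-order scan with break by a one-shot topic->index map, picks each repo's bucket as the minimum matching index (default = uncategorized), accumulates into an index-addressed bucket array and zips the result dict together at the end.
import Mathlib
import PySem

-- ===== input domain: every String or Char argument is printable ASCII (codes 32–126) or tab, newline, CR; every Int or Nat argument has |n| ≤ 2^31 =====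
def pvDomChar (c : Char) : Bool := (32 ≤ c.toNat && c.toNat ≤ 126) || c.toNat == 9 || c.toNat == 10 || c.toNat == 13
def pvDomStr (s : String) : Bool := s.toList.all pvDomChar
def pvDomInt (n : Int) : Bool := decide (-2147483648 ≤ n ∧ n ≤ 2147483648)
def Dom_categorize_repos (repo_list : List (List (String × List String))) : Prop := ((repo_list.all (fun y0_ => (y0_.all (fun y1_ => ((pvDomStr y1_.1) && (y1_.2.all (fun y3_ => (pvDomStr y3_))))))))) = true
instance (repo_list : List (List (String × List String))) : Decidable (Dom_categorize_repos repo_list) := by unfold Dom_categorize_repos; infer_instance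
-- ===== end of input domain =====

-- ===== PORT A =====
-- B swaps A's priority-order scan-with-break for a min-index selection over a topic->index
-- map and an index-addressed bucket array (alternative decomposition; return value only).

-- TOPIC_PRIORITY
def pvTopicPriority : List String := ["meta", "ecosystem", "enabler", "sector", "worker", "product"]

-- repo.get("topics", [])  (a Python dict argument arrives as an association list; dict(pairs) = Dict.ofList)
def pvGetTopics (repo : List (String × List String)) : List String :=
  (PySem.Dict.ofList repo).getD "topics" []

-- A's inner 'for topic in TOPIC_PRIORITY: if topic in repo_topics: … break' — first priority topic present
def pvFirstTopic : List String → List String → Option String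
  | [], _ => none
  | t :: ts, topics => if t ∈ topics then some t else pvFirstTopic ts topics

-- A's loop body: append repo to the bucket of the first matching topic, else to "uncategorized"
def pvStepA (d : PySem.Dict String (List (List (String × List String)))) (repo : List (String × List String)) :
    PySem.Dict String (List (List (String × List String))) :=
  match pvFirstTopic pvTopicPriority (pvGetTopics repo) with
  | some t => d.modify t [] (· ++ [repo])
  | none => d.modify "uncategorized" [] (· ++ [repo])

def categorize_repos (repo_list : List (List (String × List String))) : List (String × List (List (String × List String))) :=
  -- categorized = {topic: [] for topic in TOPIC_PRIORITY}; categorized["uncategorized"] = []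
  let init := (pvTopicPriority.foldl (fun d t => d.insert t ([] : List (List (String × List String)))) PySem.Dict.empty).insert "uncategorized" []
  (repo_list.foldl pvStepA init).items

-- ===== PORT B =====
-- idx = {topic: i for i, topic in enumerate(TOPIC_PRIORITY)}
def pvIdx : PySem.Dict String Nat :=
  pvTopicPriority.zipIdx.foldl (fun d p => d.insert p.1 p.2) PySem.Dict.empty

-- min([idx[t] for t in topics if t in idx], default=n)  — hand-ported min-with-default, exact for Nat
def pvBest (topics : List String) : Nat :=
  match topics.filterMap (fun t => pvIdx.get? t) with
  | [] => 6
  | c :: cs => cs.foldl min c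

-- buckets[best].append(repo)
def pvStepB (buckets : List (List (List (String × List String)))) (repo : List (String × List String)) :
    List (List (List (String × List String))) :=
  let b := pvBest (pvGetTopics repo)
  buckets.set b ((buckets.getD b []) ++ [repo])

def categorize_repos_alt (repo_list : List (List (String × List String))) : List (String × List (List (String × List String))) :=
  -- buckets = [[] for _ in range(n + 1)]; loop; out = dict(zip(TOPIC_PRIORITY, buckets)); out["uncategorized"] = buckets[n]
  let buckets := repo_list.foldl pvStepB (List.replicate 7 [])
  pvTopicPriority.zip buckets ++ [("uncategorized", buckets.getD 6 [])]

-- ===== PRECONDITION & SPEC =====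
def Spec_categorize_repos (repo_list : List (List (String × List String))) (out : List (String × List (List (String × List String)))) : Prop := out = categorize_repos_alt repo_list
instance (repo_list : List (List (String × List String))) (out : List (String × List (List (String × List String)))) : Decidable (Spec_categorize_repos repo_list out) := by unfold Spec_categorize_repos; infer_instance

-- ===== CLAIM (what is proved, stated in full; the proofs are below) =====
def Claim_equal_categorize_repos : Prop := ∀ (repo_list : List (List (String × List String))), Dom_categorize_repos repo_list → Spec_categorize_repos repo_list (categorize_repos repo_list)

-- ===== LEMMAS AND PROOFS =====

-- A's state with the seven fixed keys and arbitrary bucket contents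
def pvDictOf (l0 l1 l2 l3 l4 l5 l6 : List (List (String × List String))) :
    PySem.Dict String (List (List (String × List String))) :=
  PySem.Dict.mk [("meta", l0), ("ecosystem", l1), ("enabler", l2), ("sector", l3),
    ("worker", l4), ("product", l5), ("uncategorized", l6)]

-- B's output assembly, as written in the port
def pvOut (buckets : List (List (List (String × List String)))) :
    List (String × List (List (String × List String))) :=
  pvTopicPriority.zip buckets ++ [("uncategorized", buckets.getD 6 [])]

-- the priority index of a single topic, defaulting to 6
def pvFd (t : String) : Nat := (pvIdx.get? t).getD 6

-- the minimum priority index over a topic list (6 = no match)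
def pvGsel : List String → Nat
  | [] => 6
  | t :: ts => min (pvFd t) (pvGsel ts)

lemma pvIdx_get? (t : String) : pvIdx.get? t =
    if "meta" = t then some 0 else if "ecosystem" = t then some 1 else if "enabler" = t then some 2
    else if "sector" = t then some 3 else if "worker" = t then some 4
    else if "product" = t then some 5 else none := by
  simp [pvIdx, pvTopicPriority, List.zipIdx, PySem.Dict.insert, PySem.Dict.empty,
    PySem.Dict.get?, PySem.Dict.contains]
  split_ifs <;> simp_all [beq_eq_decide]

lemma pvFd_le (t : String) : pvFd t ≤ 6 := by
  simp only [pvFd, pvIdx_get?]; split_ifs <;> simp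

lemma pvFd_cases (t : String) : pvFd t = 6 ∨ (t = "meta" ∧ pvFd t = 0) ∨
    (t = "ecosystem" ∧ pvFd t = 1) ∨ (t = "enabler" ∧ pvFd t = 2) ∨ (t = "sector" ∧ pvFd t = 3) ∨
    (t = "worker" ∧ pvFd t = 4) ∨ (t = "product" ∧ pvFd t = 5) := by
  simp only [pvFd, pvIdx_get?]; split_ifs <;> simp_all

lemma pvF_le (t : String) (v : Nat) (h : pvIdx.get? t = some v) : v ≤ 5 := by
  rw [pvIdx_get?] at h; split_ifs at h <;> simp_all <;> omega

lemma pvGsel_le (T : List String) : pvGsel T ≤ 6 := by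
  induction T with
  | nil => simp [pvGsel]
  | cons t ts ih => simp only [pvGsel]; omega

lemma pvGsel_le_of_mem {t : String} {T : List String} (h : t ∈ T) : pvGsel T ≤ pvFd t := by
  induction T with
  | nil => cases h
  | cons s ts ih =>
    rcases List.mem_cons.mp h with h | h
    · subst h; simp only [pvGsel]; omega
    · have := ih h; simp only [pvGsel]; omega

lemma pvGsel_lb (T : List String) : pvGsel T = 6 ∨ ∃ t ∈ T, pvFd t = pvGsel T := by
  induction T with
  | nil => left; rfl
  | cons s ts ih =>
    by_cases h : pvFd s ≤ pvGsel ts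
    · right; exact ⟨s, List.mem_cons_self, by simp only [pvGsel]; omega⟩
    · rcases ih with h6 | ⟨t, ht, he⟩
      · left; have := pvFd_le s; simp only [pvGsel]; omega
      · right; exact ⟨t, List.mem_cons_of_mem _ ht, by simp only [pvGsel]; omega⟩

lemma pvFoldMin (T : List String) (a : Nat) (ha : a ≤ 6) :
    (T.filterMap (fun t => pvIdx.get? t)).foldl min a = min a (pvGsel T) := by
  induction T generalizing a with
  | nil => simp [pvGsel]; omega
  | cons t ts ih =>
    cases hf : pvIdx.get? t with
    | none =>
      have h6 : pvFd t = 6 := by simp [pvFd, hf]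
      have := pvGsel_le ts
      simp only [List.filterMap_cons, hf, pvGsel, h6, ih a ha]; omega
    | some v =>
      have hv : pvFd t = v := by simp [pvFd, hf]
      have hv5 := pvF_le t v hf
      have hm : min a v ≤ 6 := by omega
      simp only [List.filterMap_cons, hf, List.foldl_cons, pvGsel, hv, ih (min a v) hm]
      omega

lemma pvGsel_of_none (T : List String) (h : T.filterMap (fun t => pvIdx.get? t) = []) :
    pvGsel T = 6 := by
  induction T with
  | nil => rfl
  | cons t ts ih =>
    simp only [List.filterMap_cons] at h
    cases hf : pvIdx.get? t with
    | some v => rw [hf] at h; cases h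
    | none =>
      rw [hf] at h
      have h6 : pvFd t = 6 := by simp [pvFd, hf]
      simp [pvGsel, h6, ih h]

lemma pvBest_eq_gsel (T : List String) : pvBest T = pvGsel T := by
  unfold pvBest
  cases hT : T.filterMap (fun t => pvIdx.get? t) with
  | nil => rw [pvGsel_of_none T hT]
  | cons c cs =>
    show cs.foldl min c = pvGsel T
    have hc : c ≤ 5 := by
      have hcm : c ∈ T.filterMap (fun t => pvIdx.get? t) := by rw [hT]; exact List.mem_cons_self
      rcases List.mem_filterMap.mp hcm with ⟨t, _, hf⟩
      exact pvF_le t c hf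
    have h1 : (c :: cs).foldl min 6 = cs.foldl min c := by
      simp only [List.foldl_cons]
      congr 1
      omega
    have h2 := pvFoldMin T 6 le_rfl
    rw [hT, h1] at h2
    rw [h2]
    have := pvGsel_le T
    omega

lemma pvLoop : ∀ (repos : List (List (String × List String))) (l0 l1 l2 l3 l4 l5 l6 : List (List (String × List String))),
    (repos.foldl pvStepA (pvDictOf l0 l1 l2 l3 l4 l5 l6)).items
      = pvOut (repos.foldl pvStepB [l0, l1, l2, l3, l4, l5, l6]) := by
  intro repos
  induction repos with
  | nil =>
    intro l0 l1 l2 l3 l4 l5 l6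
    simp [pvDictOf, pvOut, pvTopicPriority]
  | cons r rs ih =>
    intro l0 l1 l2 l3 l4 l5 l6
    simp only [List.foldl_cons]
    by_cases h0 : "meta" ∈ pvGetTopics r
    · have hg : pvGsel (pvGetTopics r) = 0 := by
        have hub := pvGsel_le_of_mem h0
        rw [show pvFd "meta" = 0 from by decide] at hub
        rcases pvGsel_lb (pvGetTopics r) with h6 | ⟨t, ht, he⟩
        · omega
        · rcases pvFd_cases t with hfd | ⟨rfl, hfd⟩ | ⟨rfl, hfd⟩ | ⟨rfl, hfd⟩ | ⟨rfl, hfd⟩ | ⟨rfl, hfd⟩ | ⟨rfl, hfd⟩ <;>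
            omega
      have hA : pvStepA (pvDictOf l0 l1 l2 l3 l4 l5 l6) r = pvDictOf (l0 ++ [r]) l1 l2 l3 l4 l5 l6 := by
        simp only [pvStepA, pvTopicPriority, pvFirstTopic, h0]
        simp [pvDictOf, PySem.Dict.modify, PySem.Dict.insert, PySem.Dict.getD, PySem.Dict.get?,
          PySem.Dict.contains]
      have hB : pvStepB [l0, l1, l2, l3, l4, l5, l6] r = [(l0 ++ [r]), l1, l2, l3, l4, l5, l6] := by
        simp only [pvStepB, pvBest_eq_gsel, hg]
        rfl
      rw [hA, hB]
      exact ih (l0 ++ [r]) l1 l2 l3 l4 l5 l6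
    by_cases h1 : "ecosystem" ∈ pvGetTopics r
    · have hg : pvGsel (pvGetTopics r) = 1 := by
        have hub := pvGsel_le_of_mem h1
        rw [show pvFd "ecosystem" = 1 from by decide] at hub
        rcases pvGsel_lb (pvGetTopics r) with h6 | ⟨t, ht, he⟩
        · omega
        · rcases pvFd_cases t with hfd | ⟨rfl, hfd⟩ | ⟨rfl, hfd⟩ | ⟨rfl, hfd⟩ | ⟨rfl, hfd⟩ | ⟨rfl, hfd⟩ | ⟨rfl, hfd⟩ <;>
            first | omega | simp_all
      have hA : pvStepA (pvDictOf l0 l1 l2 l3 l4 l5 l6) r = pvDictOf l0 (l1 ++ [r]) l2 l3 l4 l5 l6 := by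
        simp only [pvStepA, pvTopicPriority, pvFirstTopic, h0, h1]
        simp [pvDictOf, PySem.Dict.modify, PySem.Dict.insert, PySem.Dict.getD, PySem.Dict.get?,
          PySem.Dict.contains]
      have hB : pvStepB [l0, l1, l2, l3, l4, l5, l6] r = [l0, (l1 ++ [r]), l2, l3, l4, l5, l6] := by
        simp only [pvStepB, pvBest_eq_gsel, hg]
        rfl
      rw [hA, hB]
      exact ih l0 (l1 ++ [r]) l2 l3 l4 l5 l6
    by_cases h2 : "enabler" ∈ pvGetTopics r
    · have hg : pvGsel (pvGetTopics r) = 2 := by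
        have hub := pvGsel_le_of_mem h2
        rw [show pvFd "enabler" = 2 from by decide] at hub
        rcases pvGsel_lb (pvGetTopics r) with h6 | ⟨t, ht, he⟩
        · omega
        · rcases pvFd_cases t with hfd | ⟨rfl, hfd⟩ | ⟨rfl, hfd⟩ | ⟨rfl, hfd⟩ | ⟨rfl, hfd⟩ | ⟨rfl, hfd⟩ | ⟨rfl, hfd⟩ <;>
            first | omega | simp_all
      have hA : pvStepA (pvDictOf l0 l1 l2 l3 l4 l5 l6) r = pvDictOf l0 l1 (l2 ++ [r]) l3 l4 l5 l6 := by
        simp only [pvStepA, pvTopicPriority, pvFirstTopic, h0, h1, h2]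
        simp [pvDictOf, PySem.Dict.modify, PySem.Dict.insert, PySem.Dict.getD, PySem.Dict.get?,
          PySem.Dict.contains]
      have hB : pvStepB [l0, l1, l2, l3, l4, l5, l6] r = [l0, l1, (l2 ++ [r]), l3, l4, l5, l6] := by
        simp only [pvStepB, pvBest_eq_gsel, hg]
        rfl
      rw [hA, hB]
      exact ih l0 l1 (l2 ++ [r]) l3 l4 l5 l6
    by_cases h3 : "sector" ∈ pvGetTopics r
    · have hg : pvGsel (pvGetTopics r) = 3 := by
        have hub := pvGsel_le_of_mem h3
        rw [show pvFd "sector" = 3 from by decide] at hub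
        rcases pvGsel_lb (pvGetTopics r) with h6 | ⟨t, ht, he⟩
        · omega
        · rcases pvFd_cases t with hfd | ⟨rfl, hfd⟩ | ⟨rfl, hfd⟩ | ⟨rfl, hfd⟩ | ⟨rfl, hfd⟩ | ⟨rfl, hfd⟩ | ⟨rfl, hfd⟩ <;>
            first | omega | simp_all
      have hA : pvStepA (pvDictOf l0 l1 l2 l3 l4 l5 l6) r = pvDictOf l0 l1 l2 (l3 ++ [r]) l4 l5 l6 := by
        simp only [pvStepA, pvTopicPriority, pvFirstTopic, h0, h1, h2, h3]
        simp [pvDictOf, PySem.Dict.modify, PySem.Dict.insert, PySem.Dict.getD, PySem.Dict.get?,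
          PySem.Dict.contains]
      have hB : pvStepB [l0, l1, l2, l3, l4, l5, l6] r = [l0, l1, l2, (l3 ++ [r]), l4, l5, l6] := by
        simp only [pvStepB, pvBest_eq_gsel, hg]
        rfl
      rw [hA, hB]
      exact ih l0 l1 l2 (l3 ++ [r]) l4 l5 l6
    by_cases h4 : "worker" ∈ pvGetTopics r
    · have hg : pvGsel (pvGetTopics r) = 4 := by
        have hub := pvGsel_le_of_mem h4
        rw [show pvFd "worker" = 4 from by decide] at hub
        rcases pvGsel_lb (pvGetTopics r) with h6 | ⟨t, ht, he⟩
        · omega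
        · rcases pvFd_cases t with hfd | ⟨rfl, hfd⟩ | ⟨rfl, hfd⟩ | ⟨rfl, hfd⟩ | ⟨rfl, hfd⟩ | ⟨rfl, hfd⟩ | ⟨rfl, hfd⟩ <;>
            first | omega | simp_all
      have hA : pvStepA (pvDictOf l0 l1 l2 l3 l4 l5 l6) r = pvDictOf l0 l1 l2 l3 (l4 ++ [r]) l5 l6 := by
        simp only [pvStepA, pvTopicPriority, pvFirstTopic, h0, h1, h2, h3, h4]
        simp [pvDictOf, PySem.Dict.modify, PySem.Dict.insert, PySem.Dict.getD, PySem.Dict.get?,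
          PySem.Dict.contains]
      have hB : pvStepB [l0, l1, l2, l3, l4, l5, l6] r = [l0, l1, l2, l3, (l4 ++ [r]), l5, l6] := by
        simp only [pvStepB, pvBest_eq_gsel, hg]
        rfl
      rw [hA, hB]
      exact ih l0 l1 l2 l3 (l4 ++ [r]) l5 l6
    by_cases h5 : "product" ∈ pvGetTopics r
    · have hg : pvGsel (pvGetTopics r) = 5 := by
        have hub := pvGsel_le_of_mem h5
        rw [show pvFd "product" = 5 from by decide] at hub
        rcases pvGsel_lb (pvGetTopics r) with h6 | ⟨t, ht, he⟩
        · omega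
        · rcases pvFd_cases t with hfd | ⟨rfl, hfd⟩ | ⟨rfl, hfd⟩ | ⟨rfl, hfd⟩ | ⟨rfl, hfd⟩ | ⟨rfl, hfd⟩ | ⟨rfl, hfd⟩ <;>
            first | omega | simp_all
      have hA : pvStepA (pvDictOf l0 l1 l2 l3 l4 l5 l6) r = pvDictOf l0 l1 l2 l3 l4 (l5 ++ [r]) l6 := by
        simp only [pvStepA, pvTopicPriority, pvFirstTopic, h0, h1, h2, h3, h4, h5]
        simp [pvDictOf, PySem.Dict.modify, PySem.Dict.insert, PySem.Dict.getD, PySem.Dict.get?,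
          PySem.Dict.contains]
      have hB : pvStepB [l0, l1, l2, l3, l4, l5, l6] r = [l0, l1, l2, l3, l4, (l5 ++ [r]), l6] := by
        simp only [pvStepB, pvBest_eq_gsel, hg]
        rfl
      rw [hA, hB]
      exact ih l0 l1 l2 l3 l4 (l5 ++ [r]) l6
    have hg : pvGsel (pvGetTopics r) = 6 := by
      rcases pvGsel_lb (pvGetTopics r) with h6 | ⟨t, ht, he⟩
      · exact h6
      · rcases pvFd_cases t with hfd | ⟨rfl, hfd⟩ | ⟨rfl, hfd⟩ | ⟨rfl, hfd⟩ | ⟨rfl, hfd⟩ | ⟨rfl, hfd⟩ | ⟨rfl, hfd⟩ <;>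
          first | omega | simp_all
    have hA : pvStepA (pvDictOf l0 l1 l2 l3 l4 l5 l6) r = pvDictOf l0 l1 l2 l3 l4 l5 (l6 ++ [r]) := by
      simp only [pvStepA, pvTopicPriority, pvFirstTopic, h0, h1, h2, h3, h4, h5]
      simp [pvDictOf, PySem.Dict.modify, PySem.Dict.insert, PySem.Dict.getD, PySem.Dict.get?,
        PySem.Dict.contains]
    have hB : pvStepB [l0, l1, l2, l3, l4, l5, l6] r = [l0, l1, l2, l3, l4, l5, (l6 ++ [r])] := by
      simp only [pvStepB, pvBest_eq_gsel, hg]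
      rfl
    rw [hA, hB]
    exact ih l0 l1 l2 l3 l4 l5 (l6 ++ [r])

-- ===== VERDICT (by name: the statement is the Claim_ definition above) =====
theorem categorize_repos_spec : Claim_equal_categorize_repos := by
  intro repo_list _
  show categorize_repos repo_list = categorize_repos_alt repo_list
  unfold categorize_repos categorize_repos_alt
  exact pvLoop repo_list [] [] [] [] [] [] []
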